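-- pv_equiv track=rewrite | github.com/CodecoolGlobal/lightweight-erp-python-sudocrem | crm/crm.py | get_longest_name_id
-- ===== SOURCE A (Python) =====
-- def get_longest_name_id(table):
--     """
--         Question: What is the id of the customer with the longest name?
--
--         Args:
--             table (list): data table to work on
--
--         Returns:
--             string: id of the longest name (if there are more than one, return
--                 the last by alphabetical order of the names)
--         """
--
--     longest_string_length = 0
--     longest_string_ID = ''
--     longest_string_name = ''
--     for record in table:
--         if len(record[1]) >= longest_string_length:
--             if len(record[1]) == longest_string_length:
--                 if record[1] > longest_string_name:
--                     longest_string_length = len(record[1])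
--                     longest_string_ID = record[0]
--                     longest_string_name = record[1]
--                 else:
--                     continue
--             else:
--                 longest_string_length = len(record[1])
--                 longest_string_ID = record[0]
--                 longest_string_name = record[1]
--     return longest_string_ID
-- ===== SOURCE B (Python) =====
-- def get_longest_name_id(table):
--     ordered = sorted(table, key=lambda record: (len(record[1]), record[1]), reverse=True)
--     if not ordered:
--         return ''
--     return ordered[0][0]
-- ===== Notes on version B (the rewrite author's own statement) =====
-- stated objective: simpler
-- what changed: Replaces the hand-rolled running-maximum loop over three state variables by a stable descending sort on the key (len(name), name) followed by taking the first row's id.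
-- intended difference: On nonempty tables where every customer name is the empty string, A returns '' (its never-updated initial accumulator) while B returns the id of the first record, which is the id of a customer with a longest name as the function intends. — e.g. on get_longest_name_id([["a", ""]]): A returns "", B returns "a"
import Mathlib
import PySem

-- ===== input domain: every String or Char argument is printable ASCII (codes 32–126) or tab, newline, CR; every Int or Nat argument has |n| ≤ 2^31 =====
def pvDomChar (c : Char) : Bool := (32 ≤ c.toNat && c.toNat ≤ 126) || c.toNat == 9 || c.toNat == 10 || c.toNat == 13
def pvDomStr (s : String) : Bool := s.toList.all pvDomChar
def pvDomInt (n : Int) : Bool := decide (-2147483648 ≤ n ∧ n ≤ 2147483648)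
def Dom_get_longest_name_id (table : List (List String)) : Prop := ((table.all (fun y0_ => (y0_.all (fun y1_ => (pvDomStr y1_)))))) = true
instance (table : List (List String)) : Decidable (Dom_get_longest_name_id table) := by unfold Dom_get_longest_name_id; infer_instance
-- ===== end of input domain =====

-- B replaces A's hand-rolled running-maximum loop by a stable descending sort on
-- the key (len(name), name) and taking the first row's id (objective: simpler).


-- ===== PORT A =====
def get_longest_name_id (table : List (List String)) : String :=
  (table.foldl
    (fun (st : Int × String × String) record =>
      if st.1 ≤ PySem.Str.len (PySem.List.pyGetD record 1 "") then
        if PySem.Str.len (PySem.List.pyGetD record 1 "") = st.1 then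
          if st.2.2 < PySem.List.pyGetD record 1 "" then
            (PySem.Str.len (PySem.List.pyGetD record 1 ""),
             PySem.List.pyGetD record 0 "", PySem.List.pyGetD record 1 "")
          else st
        else
          (PySem.Str.len (PySem.List.pyGetD record 1 ""),
           PySem.List.pyGetD record 0 "", PySem.List.pyGetD record 1 "")
      else st)
    (0, "", "")).2.1

-- ===== PORT B =====
def get_longest_name_id_alt (table : List (List String)) : String :=
  match PySem.List.sorted2 table
      (fun record => PySem.Str.len (PySem.List.pyGetD record 1 ""))
      (fun record => PySem.List.pyGetD record 1 "") true with
  | [] => ""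
  | r :: _ => PySem.List.pyGetD r 0 ""

-- ===== PRECONDITION & SPEC =====
-- Pre_ excludes exactly the tables containing a record of fewer than 2 fields, on which A raises IndexError.
def Pre_get_longest_name_id (table : List (List String)) : Prop := ∀ r ∈ table, 2 ≤ r.length
instance (table : List (List String)) : Decidable (Pre_get_longest_name_id table) := by unfold Pre_get_longest_name_id; infer_instance
def pvWitness_get_longest_name_id : List (List String) := [["1", "Bob"], ["2", "Al"]]

-- On nonempty tables where every customer name is the empty string, A returns '' (its never-updated
-- initial accumulator) while B returns the id of the first record, which is the id of a customer
-- with a longest name as the function intends.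
def D_get_longest_name_id (table : List (List String)) : Prop :=
  table ≠ [] ∧ (∀ r ∈ table, PySem.List.pyGetD r 1 "" = "") ∧
    PySem.List.pyGetD (table.headD []) 0 "" ≠ ""
instance (table : List (List String)) : Decidable (D_get_longest_name_id table) := by unfold D_get_longest_name_id; infer_instance

def Spec_get_longest_name_id (table : List (List String)) (out : String) : Prop :=
  ¬ D_get_longest_name_id table → out = get_longest_name_id_alt table
instance (table : List (List String)) (out : String) : Decidable (Spec_get_longest_name_id table out) := by unfold Spec_get_longest_name_id; infer_instance

def pvDiffWitness_get_longest_name_id : List (List String) := [["a", ""]]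
def pvDiffWitnessOut_get_longest_name_id : String × String := ("", "a")

-- ===== CLAIM (what is proved, stated in full; the proofs are below) =====
def Claim_unchanged_get_longest_name_id : Prop := ∀ (table : List (List String)), Dom_get_longest_name_id table → Pre_get_longest_name_id table → Spec_get_longest_name_id table (get_longest_name_id table)
def Claim_changed_get_longest_name_id : Prop := Dom_get_longest_name_id (pvDiffWitness_get_longest_name_id) ∧ Pre_get_longest_name_id (pvDiffWitness_get_longest_name_id) ∧ D_get_longest_name_id (pvDiffWitness_get_longest_name_id) ∧ get_longest_name_id (pvDiffWitness_get_longest_name_id) = pvDiffWitnessOut_get_longest_name_id.1 ∧ get_longest_name_id_alt (pvDiffWitness_get_longest_name_id) = pvDiffWitnessOut_get_longest_name_id.2 ∧ pvDiffWitnessOut_get_longest_name_id.1 ≠ pvDiffWitnessOut_get_longest_name_id.2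
def Claim_exact_get_longest_name_id : Prop := ∀ (table : List (List String)), Dom_get_longest_name_id table → Pre_get_longest_name_id table → D_get_longest_name_id table → get_longest_name_id table ≠ get_longest_name_id_alt table

-- ===== LEMMAS AND PROOFS =====

def pvName (r : List String) : String := PySem.List.pyGetD r 1 ""
def pvId (r : List String) : String := PySem.List.pyGetD r 0 ""
def pvLen (r : List String) : Int := PySem.Str.len (pvName r)
def pvBefore (a b : List String) : Bool :=
  decide (pvLen b < pvLen a) || (!decide (pvLen a < pvLen b) && decide (pvName b < pvName a))
def pvStepA (st : Int × String × String) (record : List String) : Int × String × String :=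
  if st.1 ≤ PySem.Str.len (PySem.List.pyGetD record 1 "") then
    if PySem.Str.len (PySem.List.pyGetD record 1 "") = st.1 then
      if st.2.2 < PySem.List.pyGetD record 1 "" then
        (PySem.Str.len (PySem.List.pyGetD record 1 ""),
         PySem.List.pyGetD record 0 "", PySem.List.pyGetD record 1 "")
      else st
    else
      (PySem.Str.len (PySem.List.pyGetD record 1 ""),
       PySem.List.pyGetD record 0 "", PySem.List.pyGetD record 1 "")
  else st
def pvStepB (o : Option (List String)) (r : List String) : Option (List String) :=
  some (match o with | none => r | some h => if pvBefore r h then r else h)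
def pvOut : Option (List String) → String
  | none => ""
  | some h => pvId h

theorem pv_headInsertBy (bf : List String → List String → Bool) (x : List String)
    (acc : List (List String)) :
    (PySem.List.insertBy bf x acc).head? =
      some (match acc.head? with | none => x | some h => if bf x h then x else h) := by
  cases acc with
  | nil => rfl
  | cons y ys =>
      by_cases h : bf x y = true <;> simp [PySem.List.insertBy.eq_2, h]

theorem pv_foldHead (xs : List (List String)) :
    ∀ acc : List (List String),
      (List.foldl (fun acc x => PySem.List.insertBy (fun a b => pvBefore a b) x acc) acc xs).head? =
        xs.foldl pvStepB acc.head? := by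
  induction xs with
  | nil => intro acc; rfl
  | cons x t ih =>
      intro acc
      simp only [List.foldl_cons]
      rw [ih, pv_headInsertBy]
      rfl

theorem pv_altRepr (table : List (List String)) :
    get_longest_name_id_alt table = pvOut (table.foldl pvStepB none) := by
  have hs : PySem.List.sorted2 table
      (fun record => PySem.Str.len (PySem.List.pyGetD record 1 ""))
      (fun record => PySem.List.pyGetD record 1 "") true =
      List.foldl (fun acc x => PySem.List.insertBy (fun a b => pvBefore a b) x acc) [] table := rfl
  have h := pv_foldHead table []
  simp only [List.head?_nil] at h
  unfold get_longest_name_id_alt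
  rw [hs]
  cases hL : List.foldl (fun acc x => PySem.List.insertBy (fun a b => pvBefore a b) x acc) [] table with
  | nil => rw [hL] at h; rw [← h]; rfl
  | cons r rest => rw [hL] at h; rw [← h]; rfl

theorem pv_beforeIff (h r : List String) :
    pvBefore r h = true ↔
      (pvLen h < pvLen r ∨ (¬ pvLen r < pvLen h ∧ pvName h < pvName r)) := by
  simp [pvBefore]

theorem pv_stepAgree (h r : List String) :
    pvStepA (pvLen h, pvId h, pvName h) r =
      ((fun h' => (pvLen h', pvId h', pvName h')) (if pvBefore r h then r else h)) := by
  show (if pvLen h ≤ pvLen r then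
          if pvLen r = pvLen h then
            if pvName h < pvName r then (pvLen r, pvId r, pvName r)
            else (pvLen h, pvId h, pvName h)
          else (pvLen r, pvId r, pvName r)
        else (pvLen h, pvId h, pvName h)) =
      ((fun h' => (pvLen h', pvId h', pvName h')) (if pvBefore r h then r else h))
  by_cases hL : pvLen h ≤ pvLen r
  · by_cases hE : pvLen r = pvLen h
    · by_cases hS : pvName h < pvName r
      · have hb : pvBefore r h = true := (pv_beforeIff h r).mpr (Or.inr ⟨by omega, hS⟩)
        rw [if_pos hL, if_pos hE, if_pos hS, hb]; rfl
      · have hb : pvBefore r h = false := by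
          rw [← Bool.not_eq_true, pv_beforeIff]
          push Not
          exact ⟨by omega, fun _ => hS⟩
        rw [if_pos hL, if_pos hE, if_neg hS, hb]; rfl
    · have hb : pvBefore r h = true := (pv_beforeIff h r).mpr (Or.inl (by omega))
      rw [if_pos hL, if_neg hE, hb]; rfl
  · have hb : pvBefore r h = false := by
      rw [← Bool.not_eq_true, pv_beforeIff]
      push Not
      exact ⟨by omega, fun hc => absurd hc (by omega)⟩
    rw [if_neg hL, hb]; rfl

theorem pv_matchedRun (xs : List (List String)) :
    ∀ h : List String,
      (xs.foldl pvStepA (pvLen h, pvId h, pvName h)).2.1 = pvOut (xs.foldl pvStepB (some h)) := by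
  induction xs with
  | nil => intro h; rfl
  | cons r t ih =>
      intro h
      simp only [List.foldl_cons]
      rw [pv_stepAgree]
      have hb : pvStepB (some h) r = some (if pvBefore r h then r else h) := rfl
      rw [hb]
      exact ih (if pvBefore r h then r else h)

theorem pv_aRepr (table : List (List String)) :
    get_longest_name_id table = pvOut (table.foldl pvStepB (some [])) := by
  have h0 : ((0 : Int), "", "") = (pvLen ([] : List String), pvId [], pvName []) := by decide
  have : get_longest_name_id table = (table.foldl pvStepA (0, "", "")).2.1 := rfl
  rw [this, h0]
  exact pv_matchedRun table []

theorem pv_lenNonneg (s : String) : 0 ≤ PySem.Str.len s := by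
  simp [PySem.Str.len_eq]

theorem pv_notLtEmpty (s : String) (h : ¬ ("" < s)) : s = "" := by
  rw [String.lt_iff_toList_lt] at h
  cases hs : s.toList with
  | nil => exact String.toList_inj.mp (by rw [hs]; rfl)
  | cons c cs =>
      exact absurd (show "".toList < s.toList by rw [hs]; exact List.nil_lt_cons c cs) h

theorem pv_beforeFalse (x h : List String) (hn : pvName h = "")
    (hb : pvBefore x h = false) : pvName x = "" ∧ pvLen x = 0 := by
  unfold pvBefore at hb
  rw [hn] at hb
  simp only [Bool.or_eq_false_iff, Bool.and_eq_false_iff, decide_eq_false_iff_not,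
    Bool.not_eq_false', decide_eq_true_eq] at hb
  obtain ⟨hb1, hb2⟩ := hb
  have hle : (0 : Int) ≤ pvLen x := pv_lenNonneg _
  have hl0 : pvLen ([] : List String) = 0 := by decide
  have hl : pvLen x = 0 := by
    have : pvLen h = PySem.Str.len "" := by unfold pvLen; rw [hn]
    have h0 : pvLen h = 0 := by rw [this]; decide
    rw [h0] at hb1; omega
  refine ⟨?_, hl⟩
  cases hb2 with
  | inl h2 =>
      exfalso
      have h0 : pvLen h = 0 := by unfold pvLen; rw [hn]; decide
      rw [h0] at h2; omega
  | inr h2 => exact pv_notLtEmpty _ h2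

theorem pv_beforeEmptyEmpty (x h : List String) (h1 : pvName x = "") (h2 : pvName h = "") :
    pvBefore x h = false := by
  unfold pvBefore pvLen
  rw [h1, h2]
  simp

theorem pv_noUpdate (xs : List (List String)) :
    ∀ h : List String, (∀ x ∈ xs, pvBefore x h = false) → xs.foldl pvStepB (some h) = some h := by
  induction xs with
  | nil => intro h _; rfl
  | cons x t ih =>
      intro h hall
      simp only [List.foldl_cons]
      have hb : pvBefore x h = false := hall x (List.mem_cons_self ..)
      have : pvStepB (some h) x = some h := by simp [pvStepB, hb]
      rw [this]
      exact ih h (fun y hy => hall y (List.mem_cons_of_mem _ hy))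

theorem pv_ghost (xs : List (List String)) (h h' : List String)
    (hl : pvLen h = pvLen h') (hn : pvName h = pvName h') :
    (xs.foldl pvStepB (some h) = xs.foldl pvStepB (some h')) ∨
      (xs.foldl pvStepB (some h) = some h ∧ xs.foldl pvStepB (some h') = some h' ∧
        ∀ x ∈ xs, pvBefore x h = false) := by
  induction xs with
  | nil => exact Or.inr ⟨rfl, rfl, by simp⟩
  | cons x t ih =>
      have hbe : pvBefore x h = pvBefore x h' := by
        unfold pvBefore; rw [hl, hn]
      by_cases hb : pvBefore x h = true
      · left
        simp only [List.foldl_cons]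
        have e1 : pvStepB (some h) x = some x := by simp [pvStepB, hb]
        have e2 : pvStepB (some h') x = some x := by simp [pvStepB, ← hbe, hb]
        rw [e1, e2]
      · have hb' : pvBefore x h = false := by simpa using hb
        have e1 : pvStepB (some h) x = some h := by simp [pvStepB, hb']
        have e2 : pvStepB (some h') x = some h' := by simp [pvStepB, ← hbe, hb']
        simp only [List.foldl_cons, e1, e2]
        cases ih with
        | inl hih => exact Or.inl hih
        | inr hih =>
            right
            refine ⟨hih.1, hih.2.1, ?_⟩
            intro y hy
            cases List.mem_cons.mp hy with
            | inl hyx => rw [hyx]; exact hb'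
            | inr hyt => exact hih.2.2 y hyt

-- ===== VERDICT (by name: the statement is the Claim_ definition above) =====
theorem get_longest_name_id_spec : Claim_unchanged_get_longest_name_id := by
  intro table _ _ hnD
  show get_longest_name_id table = get_longest_name_id_alt table
  rw [pv_aRepr, pv_altRepr]
  cases table with
  | nil => rfl
  | cons r t =>
      simp only [List.foldl_cons]
      have hnone : pvStepB none r = some r := rfl
      rw [hnone]
      by_cases hb : pvBefore r [] = true
      · have : pvStepB (some []) r = some r := by simp [pvStepB, hb]
        rw [this]
      · have hb' : pvBefore r [] = false := by simpa using hb
        have hstay : pvStepB (some []) r = some [] := by simp [pvStepB, hb']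
        rw [hstay]
        obtain ⟨hname, hlen⟩ := pv_beforeFalse r [] rfl hb'
        have hl : pvLen ([] : List String) = pvLen r := by
          rw [hlen]; decide
        have hn : pvName ([] : List String) = pvName r := by rw [hname]; rfl
        cases pv_ghost t [] r hl hn with
        | inl heq => rw [heq]
        | inr hst =>
            obtain ⟨e1, e2, hall⟩ := hst
            rw [e1, e2]
            show pvId [] = pvId r
            have hallnames : ∀ x ∈ r :: t, PySem.List.pyGetD x 1 "" = "" := by
              intro x hx
              cases List.mem_cons.mp hx with
              | inl hxr => rw [hxr]; exact hname
              | inr hxt =>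
                  have := pv_beforeFalse x [] rfl (hall x hxt)
                  exact this.1
            have hid : pvId r = "" := by
              by_contra hne
              exact hnD ⟨by simp, hallnames, hne⟩
            rw [hid]; rfl

theorem get_longest_name_id_changed : Claim_changed_get_longest_name_id := by
  unfold Claim_changed_get_longest_name_id
  refine ⟨by decide, by decide, by decide, ?_, by decide, by decide⟩
  show get_longest_name_id [["a", ""]] = ""
  unfold get_longest_name_id
  simp only [List.foldl_cons, List.foldl_nil]
  have h1 : PySem.List.pyGetD ["a", ""] 1 "" = "" := by decide
  have h2 : PySem.Str.len "" = 0 := by decide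
  rw [h1, h2]
  simp

theorem get_longest_name_id_tight : Claim_exact_get_longest_name_id := by
  intro table _ _ hD
  obtain ⟨hne, hall, hid⟩ := hD
  cases table with
  | nil => exact absurd rfl hne
  | cons r t =>
      rw [pv_aRepr, pv_altRepr]
      simp only [List.foldl_cons]
      have hnr : pvName r = "" := hall r (List.mem_cons_self ..)
      have hstay : pvStepB (some []) r = some [] := by
        simp [pvStepB, pv_beforeEmptyEmpty r [] hnr rfl]
      have hnone : pvStepB none r = some r := rfl
      rw [hstay, hnone]
      have hA : t.foldl pvStepB (some []) = some [] :=
        pv_noUpdate t [] (fun x hx =>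
          pv_beforeEmptyEmpty x [] (hall x (List.mem_cons_of_mem _ hx)) rfl)
      have hB : t.foldl pvStepB (some r) = some r :=
        pv_noUpdate t r (fun x hx =>
          pv_beforeEmptyEmpty x r (hall x (List.mem_cons_of_mem _ hx)) hnr)
      rw [hA, hB]
      show pvId [] ≠ pvId r
      intro hcontra
      apply hid
      show PySem.List.pyGetD r 0 "" = ""
      exact hcontra.symm
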